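-- pv_equiv track=rewrite | github.com/youralmight/implicit_chain_of_thought | src/scripts/generate_new_data.py | generate_readable_chain_of_thought
-- ===== SOURCE A (Python) =====
-- def target_format_value(value, value_length, reverse_digits):
--     '''
--     value: the integer value to be formatted
--     value_length: the length of the formatted value
--     reverse_digits: whether to reverse the digits of the value
--
--     example: target_format_value(123,5,True) -> "3 2 1 0 0"
--     '''
--     value_digits_str = [d for d in str(value)]
--     if reverse_digits:
--         value_digits_str.reverse()
--         value_digits_str.extend(["0"] * (value_length - len(value_digits_str)))
--     else:
--         value_digits_str.reverse()
--         value_digits_str.extend(["0"] * (value_length - len(value_digits_str)))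
--         value_digits_str.reverse()
--     return " ".join(value_digits_str)
--
-- def generate_readable_chain_of_thought(int_a, int_b, reverse_digits):
--     digits_a = [int(d) for d in str(int_a)]
--     len_digits_a = len(digits_a)
--     digits_b = [int(d) for d in str(int_b)]
--     len_digits_b = len(digits_b)
--     assert len_digits_a == len_digits_b
--
--     readable_chain_of_thought = ""
--     target_chain_of_thought = ""
--
--     current_sum = 0
--     for i, digit_b in reversed([*enumerate(digits_b)]):
--         digit_b_value = int(digit_b) * 10 ** (len_digits_b - 1 - i)
--         add_value = digit_b_value * int_a
--         current_sum += add_value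
--         if i == len_digits_b - 1:
--             readable_chain_of_thought += f"{str(add_value)}"
--             target_chain_of_thought += target_format_value(
--                 current_sum, len_digits_a + (len_digits_b - i), reverse_digits
--             )
--         elif i == 0:
--             readable_chain_of_thought += f" + {str(add_value)}"
--             target_chain_of_thought += (
--                 f" + {str(target_format_value(add_value,len_digits_a+(len_digits_b-i),reverse_digits))}"
--             )
--         else:
--             readable_chain_of_thought += f" + {str(add_value)}({current_sum})"
--             target_chain_of_thought += f" + {str(target_format_value(add_value,len_digits_a+(len_digits_b-i),reverse_digits))} ( {target_format_value(current_sum,len_digits_a+(len_digits_b-i),reverse_digits)} )"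
--     return target_chain_of_thought
-- ===== SOURCE B (Python) =====
-- def generate_readable_chain_of_thought(int_a, int_b, reverse_digits):
--     n = len(str(int_b))
--     assert len(str(int_a)) == n
--
--     def fmt(value, width):
--         # exactly `width` decimal digits of `value`, least significant first
--         ds = []
--         for _ in range(width):
--             ds.append(str(value % 10))
--             value //= 10
--         if not reverse_digits:
--             ds.reverse()
--         return " ".join(ds)
--
--     def rec(k):
--         # chain string for positions 0..k (built back-to-front) and the
--         # running total int_a * (int_b mod 10^(k+1)), all by modular
--         # arithmetic -- no digit strings, no prefix-sum accumulation
--         total = int_a * (int_b % 10 ** (k + 1))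
--         w = n + 1 + k
--         if k == 0:
--             return fmt(total, w), total
--         rest, prev = rec(k - 1)
--         if k == n - 1:
--             piece = fmt(total - prev, w)
--         else:
--             piece = fmt(total - prev, w) + " ( " + fmt(total, w) + " )"
--         return rest + " + " + piece, total
--
--     return rec(n - 1)[0]
-- ===== Notes on version B (the rewrite author's own statement) =====
-- stated objective: alternative
-- what changed: B never extracts digits into lists or accumulates a running sum: each running total is computed directly as int_a*(int_b mod 10^(k+1)) and each partial product as the difference of two consecutive totals, the chain is built back-to-front by structural recursion on the position, and the formatter emits exactly width digits by repeated divmod instead of str()-reverse-pad-reverse.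
import Mathlib
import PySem

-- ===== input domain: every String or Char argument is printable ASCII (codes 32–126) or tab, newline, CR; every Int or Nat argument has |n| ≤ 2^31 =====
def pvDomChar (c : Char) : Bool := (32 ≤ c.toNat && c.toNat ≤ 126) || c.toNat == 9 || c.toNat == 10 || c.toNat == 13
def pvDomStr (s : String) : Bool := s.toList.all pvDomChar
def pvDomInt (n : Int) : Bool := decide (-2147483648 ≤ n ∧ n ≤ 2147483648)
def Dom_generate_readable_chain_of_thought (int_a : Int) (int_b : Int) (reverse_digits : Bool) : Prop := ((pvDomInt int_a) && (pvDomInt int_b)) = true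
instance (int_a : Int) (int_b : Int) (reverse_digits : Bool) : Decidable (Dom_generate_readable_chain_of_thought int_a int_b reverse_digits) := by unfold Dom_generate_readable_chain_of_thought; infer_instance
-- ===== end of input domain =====

-- B drops A's digit-list extraction and running-sum loop entirely: every running total is
-- int_a * (int_b mod 10^(k+1)), each partial product is a difference of consecutive totals,
-- the chain is built back-to-front by structural recursion on the position, and the formatter
-- emits exactly `width` digits by repeated divmod; objective: alternative (same cost).

-- ===== PORT A =====
def target_format_value (value : Int) (value_length : Int) (reverse_digits : Bool) : String :=
  let value_digits_str : List String := (PySem.Int.toStr value).toList.map (fun d => String.singleton d)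
  if reverse_digits then
    let l1 := value_digits_str.reverse
    let l2 := l1 ++ PySem.List.pyRepeat ["0"] (value_length - (l1.length : Int))
    PySem.Str.join " " l2
  else
    let l1 := value_digits_str.reverse
    let l2 := l1 ++ PySem.List.pyRepeat ["0"] (value_length - (l1.length : Int))
    let l3 := l2.reverse
    PySem.Str.join " " l3

-- the loop body of A, named so the fold lemma below can speak about it
def pvBodyA (int_a len_digits_a len_digits_b : Int) (reverse_digits : Bool)
    (st : Int × String × String) (p : Int × Int) : Int × String × String :=
  let i := p.1
  let digit_b := p.2
  let digit_b_value : Int := digit_b * 10 ^ (len_digits_b - 1 - i).toNat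
  let add_value := digit_b_value * int_a
  let current_sum := st.1 + add_value
  if i = len_digits_b - 1 then
    (current_sum, st.2.1 ++ PySem.Int.toStr add_value,
      st.2.2 ++ target_format_value current_sum (len_digits_a + (len_digits_b - i)) reverse_digits)
  else if i = 0 then
    (current_sum, st.2.1 ++ " + " ++ PySem.Int.toStr add_value,
      st.2.2 ++ " + " ++ target_format_value add_value (len_digits_a + (len_digits_b - i)) reverse_digits)
  else
    (current_sum, st.2.1 ++ " + " ++ PySem.Int.toStr add_value ++ "(" ++ PySem.Int.toStr current_sum ++ ")",
      st.2.2 ++ " + " ++ target_format_value add_value (len_digits_a + (len_digits_b - i)) reverse_digits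
        ++ " ( " ++ target_format_value current_sum (len_digits_a + (len_digits_b - i)) reverse_digits ++ " )")

-- int(d) on a single char: none = ValueError (negative inputs), excluded by Pre_
def generate_readable_chain_of_thought (int_a : Int) (int_b : Int) (reverse_digits : Bool) : String :=
  let digits_a : List Int := (PySem.Int.toStr int_a).toList.map
      (fun d => (PySem.Int.ofStr? (String.singleton d)).getD 0)
  let len_digits_a : Int := digits_a.length
  let digits_b : List Int := (PySem.Int.toStr int_b).toList.map
      (fun d => (PySem.Int.ofStr? (String.singleton d)).getD 0)
  let len_digits_b : Int := digits_b.length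
  -- assert len_digits_a == len_digits_b: AssertionError excluded by Pre_
  let res := ((PySem.List.enumerate digits_b).reverse).foldl
      (pvBodyA int_a len_digits_a len_digits_b reverse_digits) (0, "", "")
  res.2.2

-- ===== PORT B =====
-- Source B's fmt: `width` decimal digits collected least-significant-first by repeated divmod
def pvFmtB (value : Int) (width : Int) (reverse_digits : Bool) : String :=
  let st := (PySem.List.pyRange 0 width 1).foldl
      (fun (st : List String × Int) _ =>
        (st.1 ++ [PySem.Int.toStr (PySem.Int.mod st.2 10)], PySem.Int.floordiv st.2 10))
      ([], value)
  let ds := if reverse_digits = false then st.1.reverse else st.1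
  PySem.Str.join " " ds

-- Source B's rec: chain for positions 0..k and the total int_a*(int_b mod 10^(k+1)),
-- structural recursion on the position k
def pvRecB (int_a int_b n : Int) (r : Bool) : Nat → String × Int
  | 0 =>
      let total := int_a * PySem.Int.mod int_b (10 ^ (0 + 1))
      (pvFmtB total (n + 1 + (0 : Nat)) r, total)
  | k + 1 =>
      let total := int_a * PySem.Int.mod int_b (10 ^ (k + 1 + 1))
      let w : Int := n + 1 + ((k : Int) + 1)
      let p := pvRecB int_a int_b n r k
      let piece := if ((k : Int) + 1) = n - 1 then pvFmtB (total - p.2) w r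
                   else pvFmtB (total - p.2) w r ++ " ( " ++ pvFmtB total w r ++ " )"
      (p.1 ++ " + " ++ piece, total)

-- assert len(str(int_a)) == n: AssertionError excluded by Pre_
def generate_readable_chain_of_thought_alt (int_a : Int) (int_b : Int) (reverse_digits : Bool) : String :=
  let n : Int := ((PySem.Int.toChars int_b).length : Int)
  (pvRecB int_a int_b n reverse_digits (n - 1).toNat).1

-- ===== PRECONDITION & SPEC =====
-- Pre_ excludes exactly the inputs where the Python A raises: a negative argument
-- (ValueError from int('-')) or operands of different decimal width (AssertionError).
def Pre_generate_readable_chain_of_thought (int_a : Int) (int_b : Int) (reverse_digits : Bool) : Prop :=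
  0 ≤ int_a ∧ 0 ≤ int_b ∧ (PySem.Int.toChars int_a).length = (PySem.Int.toChars int_b).length
instance (int_a : Int) (int_b : Int) (reverse_digits : Bool) : Decidable (Pre_generate_readable_chain_of_thought int_a int_b reverse_digits) := by unfold Pre_generate_readable_chain_of_thought; infer_instance

def pvWitness_generate_readable_chain_of_thought : Int × Int × Bool := (12, 34, false)

def Spec_generate_readable_chain_of_thought (int_a : Int) (int_b : Int) (reverse_digits : Bool) (out : String) : Prop := out = generate_readable_chain_of_thought_alt int_a int_b reverse_digits
instance (int_a : Int) (int_b : Int) (reverse_digits : Bool) (out : String) : Decidable (Spec_generate_readable_chain_of_thought int_a int_b reverse_digits out) := by unfold Spec_generate_readable_chain_of_thought; infer_instance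

-- ===== CLAIM (what is proved, stated in full; the proofs are below) =====
def Claim_equal_generate_readable_chain_of_thought : Prop := ∀ (int_a : Int) (int_b : Int) (reverse_digits : Bool), Dom_generate_readable_chain_of_thought int_a int_b reverse_digits → Pre_generate_readable_chain_of_thought int_a int_b reverse_digits → Spec_generate_readable_chain_of_thought int_a int_b reverse_digits (generate_readable_chain_of_thought int_a int_b reverse_digits)

-- ===== LEMMAS AND PROOFS =====

def pvAddOf (int_a n : Int) (p : Int × Int) : Int := p.2 * 10 ^ (n - 1 - p.1).toNat * int_a

def pvSteps (int_a n : Int) : Int → List (Int × Int) → List (Int × Int × Int)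
  | _, [] => []
  | c, p :: t => (p.1, pvAddOf int_a n p, c + pvAddOf int_a n p) :: pvSteps int_a n (c + pvAddOf int_a n p) t

def pvPiece (la n : Int) (r : Bool) (q : Int × Int × Int) : String :=
  if q.1 = n - 1 then target_format_value q.2.2 (la + (n - q.1)) r
  else if q.1 = 0 then " + " ++ target_format_value q.2.1 (la + (n - q.1)) r
  else " + " ++ target_format_value q.2.1 (la + (n - q.1)) r
    ++ " ( " ++ target_format_value q.2.2 (la + (n - q.1)) r ++ " )"

def pvCat : List String → String
  | [] => ""
  | x :: xs => x ++ pvCat xs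

def pvDecor : List String → List String
  | [] => []
  | x :: xs => x :: xs.map (fun y => " + " ++ y)

def pvCanon (int_a int_b : Int) (N : Nat) (r : Bool) (k : Nat) : String :=
  let w : Int := (N : Int) + 1 + (k : Int)
  let tot : Nat → Int := fun j => int_a * (int_b % (10 : Int) ^ (j + 1))
  if k = 0 then pvFmtB (tot 0) w r
  else if k = N - 1 then pvFmtB (tot k - tot (k - 1)) w r
  else pvFmtB (tot k - tot (k - 1)) w r ++ " ( " ++ pvFmtB (tot k) w r ++ " )"

theorem pvToDigits_reverse_getElem : ∀ (m : Nat) (k : Nat), k < (Nat.toDigits 10 m).length →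
    (Nat.toDigits 10 m).reverse[k]? = some (Nat.digitChar (m / 10 ^ k % 10)) := by
  intro m
  induction m using Nat.strong_induction_on with
  | _ m ih =>
    intro k h
    by_cases hm : m < 10
    · rw [Nat.toDigits_of_lt_base hm] at h ⊢
      simp only [List.length_singleton] at h
      interval_cases k
      simp [Nat.mod_eq_of_lt hm]
    · rw [Nat.toDigits_of_base_le (by norm_num) (by omega)] at h ⊢
      rw [List.reverse_append]
      cases k with
      | zero => simp
      | succ k =>
          have hlt : k < (Nat.toDigits 10 (m / 10)).length := by
            simp at h; omega
          have hrec := ih (m / 10) (by omega) k hlt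
          simp only [List.reverse_singleton, List.singleton_append, List.getElem?_cons_succ]
          rw [hrec, Nat.div_div_eq_div_mul, ← pow_succ']

theorem pvToDigits_lt (m : Nat) : m < 10 ^ (Nat.toDigits 10 m).length :=
  (Nat.length_toDigits_le_iff (by norm_num) Nat.length_toDigits_pos).mp le_rfl

theorem pvOfStr_digitChar (d : Nat) (h : d < 10) :
    (PySem.Int.ofStr? (String.singleton (Nat.digitChar d))).getD 0 = (d : Int) := by
  interval_cases d <;> decide

theorem pvMod_pow_succ (b : Int) (hb : 0 ≤ b) (k : Nat) :
    b % 10 ^ (k + 1) = b / 10 ^ k % 10 * 10 ^ k + b % 10 ^ k := by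
  obtain ⟨n, rfl⟩ := Int.eq_ofNat_of_zero_le hb
  have := congrArg (fun x : Nat => (x : Int)) (@Nat.mod_pow_succ n 10 k)
  push_cast at this
  rw [this]; ring

-- single-digit str(d)

theorem pvToStr_digit (d : Int) (h0 : 0 ≤ d) (h : d < 10) :
    PySem.Int.toStr d = String.singleton (Nat.digitChar d.toNat) := by
  obtain ⟨n, rfl⟩ := Int.eq_ofNat_of_zero_le h0
  unfold PySem.Int.toStr PySem.Int.toChars
  rw [if_neg (by omega)]
  rw [Nat.toDigits_of_lt_base (by omega)]
  rfl

-- the LSB-first fixed-width digit list both formatters produce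

theorem pvLSB (n : Nat) (wn : Nat) (hw : 0 < wn) (h : n < 10 ^ wn) :
    (Nat.toDigits 10 n).reverse.map String.singleton
        ++ List.replicate (wn - (Nat.toDigits 10 n).length) "0"
      = (List.range wn).map (fun j => PySem.Int.toStr ((n : Int) / 10 ^ j % 10)) := by
  have hlen : (Nat.toDigits 10 n).length ≤ wn :=
    (Nat.length_toDigits_le_iff (by norm_num) hw).mpr h
  have hsum : (Nat.toDigits 10 n).length + (wn - (Nat.toDigits 10 n).length) = wn := by omega
  have hcast : ∀ j : Nat, (n : Int) / 10 ^ j % 10 = ((n / 10 ^ j % 10 : Nat) : Int) := by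
    intro j; push_cast; ring
  apply List.ext_getElem?
  intro j
  by_cases hj : j < wn
  · rw [List.getElem?_map, List.getElem?_range hj, Option.map_some]
    by_cases hjl : j < (Nat.toDigits 10 n).length
    · rw [List.getElem?_append_left (by simp; omega), List.getElem?_map,
        pvToDigits_reverse_getElem n j hjl]
      rw [hcast, pvToStr_digit _ (by positivity) (by
        have := Nat.mod_lt (n / 10 ^ j) (by norm_num : 0 < 10)
        omega)]
      simp only [Option.map_some, Option.some.injEq]
      rw [Int.toNat_natCast]
    · rw [List.getElem?_append_right (by simp; omega)]
      have hz : n / 10 ^ j = 0 := Nat.div_eq_of_lt (lt_of_lt_of_le (pvToDigits_lt n)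
        (Nat.pow_le_pow_right (by norm_num) (by omega)))
      rw [hcast, hz]
      rw [List.getElem?_replicate]
      rw [if_pos (by simp; omega)]
      norm_num
      decide
  · rw [List.getElem?_eq_none (by simp; omega), List.getElem?_eq_none (by simp; omega)]

theorem pvFmtB_fold (v : Int) : ∀ (wn : Nat),
    ((PySem.List.pyRange 0 (wn : Int) 1).foldl
      (fun (st : List String × Int) _ =>
        (st.1 ++ [PySem.Int.toStr (PySem.Int.mod st.2 10)], PySem.Int.floordiv st.2 10))
      ([], v))
    = ((List.range wn).map (fun j => PySem.Int.toStr (v / 10 ^ j % 10)), v / 10 ^ wn) := by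
  intro wn
  induction wn with
  | zero => simp [PySem.List.pyRange]
  | succ k ih =>
      rw [show ((k + 1 : Nat) : Int) = (k : Int) + 1 by push_cast; ring,
        PySem.List.pyRange_one_succ_right (by positivity)]
      rw [List.foldl_append, ih]
      simp only [List.foldl_cons, List.foldl_nil]
      refine Prod.ext ?_ ?_
      · simp only [List.range_succ, List.map_append, List.map_cons, List.map_nil]
        rw [PySem.Int.mod_eq_emod_of_pos (by norm_num)]
      · simp only
        rw [PySem.Int.floordiv_eq_ediv_of_pos (by norm_num),
          Int.ediv_ediv_of_nonneg (by positivity), ← pow_succ]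

theorem pvFmtB_eq (v w : Int) (r : Bool) (hv : 0 ≤ v) (hw : 0 < w) (hlt : v < 10 ^ w.toNat) :
    target_format_value v w r = pvFmtB v w r := by
  obtain ⟨n, rfl⟩ := Int.eq_ofNat_of_zero_le hv
  have hn : n < 10 ^ w.toNat := by exact_mod_cast hlt
  have hdig : (PySem.Int.toStr (n : Int)).toList = Nat.toDigits 10 n := by
    rw [PySem.Int.toList_toStr]
    unfold PySem.Int.toChars
    rw [if_neg (by omega), Int.toNat_natCast]
  have hlen : (Nat.toDigits 10 n).length ≤ w.toNat :=
    (Nat.length_toDigits_le_iff (by norm_num) (by omega)).mpr hn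
  have hrep : PySem.List.pyRepeat ["0"] (w - ((Nat.toDigits 10 n).length : Int))
      = List.replicate (w.toNat - (Nat.toDigits 10 n).length) "0" := by
    rw [PySem.List.pyRepeat_singleton]
    congr 1
    omega
  have hkey := pvLSB n w.toNat (by omega) hn
  unfold target_format_value pvFmtB
  rw [hdig]
  rw [show w = (w.toNat : Int) from by omega]
  rw [pvFmtB_fold]
  simp only [List.length_reverse, List.length_map]
  rw [show PySem.List.pyRepeat ["0"] ((w.toNat : Int) - ((Nat.toDigits 10 n).length : Int))
        = List.replicate (w.toNat - (Nat.toDigits 10 n).length) "0" from by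
      rw [PySem.List.pyRepeat_singleton]; congr 1; omega]
  have hkey' : (List.map (fun d => String.singleton d) (Nat.toDigits 10 n)).reverse
        ++ List.replicate (w.toNat - (Nat.toDigits 10 n).length) "0"
      = List.map (fun j => PySem.Int.toStr ((n : Int) / 10 ^ j % 10)) (List.range w.toNat) := by
    rw [← List.map_reverse]; exact hkey
  cases r
  · simp only [Bool.false_eq_true, if_false, reduceIte]
    rw [hkey']
  · simp only [Bool.true_eq_false, if_true, if_false]
    rw [hkey']

theorem pvFmtB_eq' (x int_a : Int) (N k : Nat) (r : Bool)
    (hx0 : 0 ≤ x) (hx : x < 10 ^ (k + 1)) (ha0 : 0 ≤ int_a) (ha : int_a < 10 ^ N) :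
    target_format_value (x * int_a) ((N : Int) + 1 + (k : Int)) r
      = pvFmtB (x * int_a) ((N : Int) + 1 + (k : Int)) r := by
  apply pvFmtB_eq
  · exact mul_nonneg hx0 ha0
  · positivity
  · rw [show ((N : Int) + 1 + (k : Int)).toNat = k + 1 + N from by omega, pow_add]
    calc x * int_a < 10 ^ (k + 1) * 10 ^ N := by
          rcases eq_or_lt_of_le ha0 with h0 | h0
          · rw [← h0]; simp only [mul_zero]; positivity
          · exact mul_lt_mul'' hx ha hx0 ha0
      _ = _ := rfl

theorem pvSteps_length (int_a n : Int) : ∀ (L : List (Int × Int)) (c : Int),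
    (pvSteps int_a n c L).length = L.length := by
  intro L
  induction L with
  | nil => intro c; rfl
  | cons p t ih => intro c; simp [pvSteps, ih]

theorem pvSteps_getElem (int_a n : Int) : ∀ (L : List (Int × Int)) (c : Int) (k : Nat)
    (h : k < L.length),
    (pvSteps int_a n c L)[k]'(by rw [pvSteps_length]; exact h)
      = (L[k].1, pvAddOf int_a n L[k], c + ((L.take (k + 1)).map (pvAddOf int_a n)).sum) := by
  intro L
  induction L with
  | nil => intro c k h; simp at h
  | cons p t ih =>
      intro c k h
      cases k with
      | zero => simp [pvSteps]
      | succ k =>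
          simp only [pvSteps, List.getElem_cons_succ, List.take_succ_cons, List.map_cons,
            List.sum_cons]
          rw [ih (c + pvAddOf int_a n p) k (by simpa using h)]
          simp [add_assoc]

theorem pvDecor_length (l : List String) : (pvDecor l).length = l.length := by
  cases l <;> simp [pvDecor]

theorem pvDecor_getElem (l : List String) (k : Nat) (h : k < l.length) :
    (pvDecor l)[k]'(by rw [pvDecor_length]; exact h)
      = if k = 0 then l[k] else " + " ++ l[k] := by
  cases l with
  | nil => simp at h
  | cons x xs =>
      cases k with
      | zero => simp [pvDecor]
      | succ k => simp [pvDecor]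

theorem pvE_getElem (sb : List Char) (f : Char → Int) (k : Nat) (h : k < sb.length) :
    ((PySem.List.enumerate (sb.map f)).reverse)[k]'(by simpa using h)
      = (((sb.length - 1 - k : Nat) : Int), f (sb[sb.length - 1 - k]'(by omega))) := by
  rw [List.getElem_reverse]
  simp [PySem.List.getElem_enumerate, PySem.List.length_enumerate]

-- digit k of m (from the right), as the port's int(d) computes it

theorem pvDigit_getElem (m : Nat) (k : Nat) (h : k < (Nat.toDigits 10 m).length) :
    (PySem.Int.ofStr? (String.singleton
        ((Nat.toDigits 10 m)[(Nat.toDigits 10 m).length - 1 - k]'(by omega)))).getD 0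
      = ((m / 10 ^ k % 10 : Nat) : Int) := by
  have hr := pvToDigits_reverse_getElem m k h
  rw [List.getElem?_eq_getElem (by simpa using h)] at hr
  have hr' := Option.some.inj hr
  rw [List.getElem_reverse] at hr'
  rw [hr']
  exact pvOfStr_digitChar _ (Nat.mod_lt _ (by norm_num))

-- the per-position partial products of A, read off the enumerated digit list

theorem pvEmap (int_a int_b : Int) (hb : 0 ≤ int_b) :
    ((PySem.List.enumerate ((PySem.Int.toChars int_b).map
        (fun d => (PySem.Int.ofStr? (String.singleton d)).getD 0))).reverse).map
      (pvAddOf int_a ((PySem.Int.toChars int_b).length : Int))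
    = (List.range (PySem.Int.toChars int_b).length).map
        (fun j => int_b / 10 ^ j % 10 * 10 ^ j * int_a) := by
  have hch : PySem.Int.toChars int_b = Nat.toDigits 10 int_b.toNat := by
    unfold PySem.Int.toChars
    rw [if_neg (by omega)]
  apply List.ext_getElem
  · simp [PySem.List.length_enumerate]
  · intro k h1 h2
    have hk : k < (PySem.Int.toChars int_b).length := by
      simpa [PySem.List.length_enumerate] using h1
    rw [List.getElem_map, pvE_getElem _ _ k hk, List.getElem_map, List.getElem_range]
    simp only [pvAddOf]
    have hidx : (((PySem.Int.toChars int_b).length : Int) - 1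
        - (((PySem.Int.toChars int_b).length - 1 - k : Nat) : Int)).toNat = k := by omega
    rw [hidx]
    have hd : (PySem.Int.ofStr? (String.singleton
        ((PySem.Int.toChars int_b)[(PySem.Int.toChars int_b).length - 1 - k]'(by omega)))).getD 0
        = ((int_b.toNat / 10 ^ k % 10 : Nat) : Int) := by
      have hk' : k < (Nat.toDigits 10 int_b.toNat).length := by rw [← hch]; exact hk
      have := pvDigit_getElem int_b.toNat k hk'
      simp only [← hch] at this
      exact this
    rw [hd]
    rw [show int_b = (int_b.toNat : Int) from by omega]
    push_cast [Int.toNat_natCast]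
    ring

-- prefix sums of the partial products are int_b % 10^(k+1) * int_a

theorem pvSumRange (int_a int_b : Int) (hb : 0 ≤ int_b) : ∀ (k : Nat),
    ((List.range (k + 1)).map (fun j => int_b / 10 ^ j % 10 * 10 ^ j * int_a)).sum
      = int_b % 10 ^ (k + 1) * int_a := by
  intro k
  induction k with
  | zero =>
      simp only [List.range_succ, List.range_zero, List.nil_append, List.map_cons, List.map_nil,
        List.sum_cons, List.sum_nil, add_zero, pow_zero, Int.ediv_one, mul_one]
      rw [pvMod_pow_succ int_b hb 0]
      simp
  | succ k ih =>
      rw [List.range_succ, List.map_append, List.sum_append, ih]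
      simp only [List.map_cons, List.map_nil, List.sum_cons, List.sum_nil, add_zero]
      rw [pvMod_pow_succ int_b hb (k + 1)]
      ring

theorem pvCat_append (l1 l2 : List String) : pvCat (l1 ++ l2) = pvCat l1 ++ pvCat l2 := by
  induction l1 with
  | nil => simp [pvCat]
  | cons x xs ih => simp [pvCat, ih, String.append_assoc]

theorem pvDecor_snoc (l : List String) (x : String) (h : l ≠ []) :
    pvDecor (l ++ [x]) = pvDecor l ++ [" + " ++ x] := by
  cases l with
  | nil => simp at h
  | cons y ys => simp [pvDecor]

theorem pvB_canon (int_a int_b : Int) (N : Nat) (r : Bool) :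
    ∀ k, k < N →
    pvRecB int_a int_b (N : Int) r k
      = (pvCat (pvDecor ((List.range (k + 1)).map (pvCanon int_a int_b N r))),
         int_a * (int_b % 10 ^ (k + 1))) := by
  intro k
  induction k with
  | zero =>
      intro hk
      simp only [pvRecB]
      rw [PySem.Int.mod_eq_emod_of_pos (by norm_num)]
      refine Prod.ext ?_ rfl
      simp only [List.range_succ, List.range_zero, List.nil_append, List.map_cons, List.map_nil,
        pvDecor, pvCat]
      rw [pvCanon]
      simp [String.append_empty]
  | succ k ih =>
      intro hk
      have hrec := ih (by omega)
      simp only [pvRecB, hrec]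
      rw [PySem.Int.mod_eq_emod_of_pos (by norm_num)]
      refine Prod.ext ?_ rfl
      simp only
      rw [List.range_succ (n := k + 1), List.map_append, List.map_cons, List.map_nil,
        pvDecor_snoc _ _ (by simp [List.range_succ]), pvCat_append]
      simp only [pvCat, String.append_empty]
      have hcanon : pvCanon int_a int_b N r (k + 1)
          = if ((k : Int) + 1) = (N : Int) - 1 then
              pvFmtB (int_a * (int_b % 10 ^ (k + 1 + 1)) - int_a * (int_b % 10 ^ (k + 1)))
                ((N : Int) + 1 + ((k : Int) + 1)) r
            else
              pvFmtB (int_a * (int_b % 10 ^ (k + 1 + 1)) - int_a * (int_b % 10 ^ (k + 1)))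
                ((N : Int) + 1 + ((k : Int) + 1)) r
              ++ " ( " ++ pvFmtB (int_a * (int_b % 10 ^ (k + 1 + 1))) ((N : Int) + 1 + ((k : Int) + 1)) r ++ " )" := by
        rw [pvCanon]
        simp only
        rw [if_neg (by omega)]
        have hiff : (k + 1 = N - 1) ↔ (((k : Int) + 1) = (N : Int) - 1) := by omega
        by_cases hc : k + 1 = N - 1
        · rw [if_pos hc, if_pos (hiff.mp hc)]
          norm_num
        · rw [if_neg hc, if_neg (fun h => hc (hiff.mpr h))]
          norm_num
      rw [hcanon]
      split_ifs <;> simp [String.append_assoc]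

theorem pvA_canon (int_a int_b : Int) (r : Bool) (ha : 0 ≤ int_a) (hb : 0 ≤ int_b)
    (hl : (PySem.Int.toChars int_a).length = (PySem.Int.toChars int_b).length) :
    (pvSteps int_a ((PySem.Int.toChars int_b).length : Int) 0
        ((PySem.List.enumerate ((PySem.Int.toChars int_b).map
          (fun d => (PySem.Int.ofStr? (String.singleton d)).getD 0))).reverse)).map
      (pvPiece ((PySem.Int.toChars int_b).length : Int) ((PySem.Int.toChars int_b).length : Int) r)
      = pvDecor ((List.range (PySem.Int.toChars int_b).length).map
          (pvCanon int_a int_b (PySem.Int.toChars int_b).length r)) := by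
  have haN : int_a < 10 ^ (PySem.Int.toChars int_b).length := by
    have h1 : PySem.Int.toChars int_a = Nat.toDigits 10 int_a.toNat := by
      unfold PySem.Int.toChars; rw [if_neg (by omega)]
    have h2 := pvToDigits_lt int_a.toNat
    rw [← h1, hl] at h2
    calc int_a = (int_a.toNat : Int) := by omega
      _ < 10 ^ (PySem.Int.toChars int_b).length := by exact_mod_cast h2
  have hEmap' := pvEmap int_a int_b hb
  have hElen : ((PySem.List.enumerate ((PySem.Int.toChars int_b).map
      (fun d => (PySem.Int.ofStr? (String.singleton d)).getD 0))).reverse).length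
      = (PySem.Int.toChars int_b).length := by
    simp [PySem.List.length_enumerate]
  apply List.ext_getElem
  · simp [pvSteps_length, hElen, pvDecor_length]
  · intro k h1 h2
    have hk : k < (PySem.Int.toChars int_b).length := by
      simpa [pvSteps_length, hElen] using h1
    rw [List.getElem_map, pvSteps_getElem _ _ _ 0 k (by rw [hElen]; exact hk)]
    rw [pvDecor_getElem _ k (by simpa using hk), List.getElem_map, List.getElem_range]
    have hadd : pvAddOf int_a ((PySem.Int.toChars int_b).length : Int)
        (((PySem.List.enumerate ((PySem.Int.toChars int_b).map
          (fun d => (PySem.Int.ofStr? (String.singleton d)).getD 0))).reverse)[k]'(by rw [hElen]; exact hk))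
        = int_b / 10 ^ k % 10 * 10 ^ k * int_a := by
      have h' := congrArg (fun l => l[k]?) hEmap'
      simp only [List.getElem?_map] at h'
      rw [List.getElem?_eq_getElem (by rw [hElen]; exact hk),
        List.getElem?_range hk, Option.map_some, Option.map_some] at h'
      exact Option.some.inj h'
    have hsum : (((((PySem.List.enumerate ((PySem.Int.toChars int_b).map
          (fun d => (PySem.Int.ofStr? (String.singleton d)).getD 0))).reverse)).take (k + 1)).map
          (pvAddOf int_a ((PySem.Int.toChars int_b).length : Int))).sum
        = int_b % 10 ^ (k + 1) * int_a := by
      rw [List.map_take, hEmap', ← List.map_take, List.take_range,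
        show min (k + 1) (PySem.Int.toChars int_b).length = k + 1 from by omega]
      exact pvSumRange int_a int_b hb k
    rw [hadd, hsum]
    have hfst : (((PySem.List.enumerate ((PySem.Int.toChars int_b).map
          (fun d => (PySem.Int.ofStr? (String.singleton d)).getD 0))).reverse)[k]'(by rw [hElen]; exact hk)).1
        = (((PySem.Int.toChars int_b).length - 1 - k : Nat) : Int) := by
      rw [pvE_getElem _ _ k hk]
    rw [hfst]
    have htot : ∀ j : Nat, int_b % 10 ^ (j + 1) * int_a = int_a * (int_b % 10 ^ (j + 1)) := by
      intro j; ring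
    have hwidth : ((PySem.Int.toChars int_b).length : Int)
          + (((PySem.Int.toChars int_b).length : Int) - (((PySem.Int.toChars int_b).length - 1 - k : Nat) : Int))
        = ((PySem.Int.toChars int_b).length : Int) + 1 + (k : Int) := by omega
    simp only [pvPiece, pvCanon, zero_add, hwidth]
    have hxs0 : ∀ j : Nat, (0:Int) ≤ int_b % 10 ^ (j + 1) :=
      fun j => Int.emod_nonneg _ (by positivity : (0:Int) < 10 ^ (j+1)).ne'
    have hxslt : ∀ j : Nat, int_b % 10 ^ (j + 1) < 10 ^ (j + 1) :=
      fun j => Int.emod_lt_of_pos _ (by positivity)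
    by_cases hk0 : k = 0
    · subst hk0
      rw [if_pos (by omega), if_pos rfl]
      rw [pvFmtB_eq' (int_b % 10 ^ (0 + 1)) int_a _ 0 r (hxs0 0) (hxslt 0) ha haN, htot 0]
      norm_num
    · have hne1 : ¬ ((((PySem.Int.toChars int_b).length - 1 - k : Nat) : Int)
          = ((PySem.Int.toChars int_b).length : Int) - 1) := by omega
      rw [if_neg hne1, if_neg hk0]
      have haddval : int_b / 10 ^ k % 10 * 10 ^ k * int_a
          = int_a * (int_b % 10 ^ (k + 1)) - int_a * (int_b % 10 ^ (k - 1 + 1)) := by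
        rw [show k - 1 + 1 = k from by omega, pvMod_pow_succ int_b hb k]
        ring
      have haddfmt : target_format_value (int_b / 10 ^ k % 10 * 10 ^ k * int_a)
            (((PySem.Int.toChars int_b).length : Int) + 1 + (k : Int)) r
          = pvFmtB (int_b / 10 ^ k % 10 * 10 ^ k * int_a)
            (((PySem.Int.toChars int_b).length : Int) + 1 + (k : Int)) r := by
        refine pvFmtB_eq' _ _ _ k r ?_ ?_ ha haN
        · have h10 : (0:Int) ≤ int_b / 10 ^ k % 10 := Int.emod_nonneg _ (by norm_num)
          positivity
        · have h10 : int_b / 10 ^ k % 10 < 10 := Int.emod_lt_of_pos _ (by norm_num)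
          calc int_b / 10 ^ k % 10 * 10 ^ k < 10 * 10 ^ k :=
                mul_lt_mul_of_pos_right h10 (by positivity)
            _ = 10 ^ (k + 1) := by ring
      by_cases hkl : k = (PySem.Int.toChars int_b).length - 1
      · rw [if_pos (by omega), if_pos hkl, haddfmt, haddval, if_neg hk0]
      · rw [if_neg (by omega), if_neg hkl, haddfmt,
          pvFmtB_eq' (int_b % 10 ^ (k + 1)) int_a _ k r (hxs0 k) (hxslt k) ha haN,
          haddval, htot k]
        simp [hk0, String.append_assoc]

-- A's fold body, characterised (first component and target-string component)
theorem pvBodyA_fst (int_a la n : Int) (r : Bool) (st : Int × String × String) (p : Int × Int) :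
    (pvBodyA int_a la n r st p).1 = st.1 + pvAddOf int_a n p := by
  simp only [pvBodyA, pvAddOf]
  split_ifs <;> rfl

theorem pvBodyA_trg (int_a la n : Int) (r : Bool) (st : Int × String × String) (p : Int × Int) :
    (pvBodyA int_a la n r st p).2.2
      = st.2.2 ++ pvPiece la n r (p.1, pvAddOf int_a n p, st.1 + pvAddOf int_a n p) := by
  simp only [pvBodyA, pvPiece, pvAddOf]
  split_ifs <;> simp [String.append_assoc]

theorem pvFoldA (int_a la n : Int) (r : Bool) : ∀ (L : List (Int × Int)) (c : Int) (r0 t0 : String),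
    ((L.foldl (pvBodyA int_a la n r) (c, r0, t0)).2.2)
      = t0 ++ pvCat ((pvSteps int_a n c L).map (pvPiece la n r)) := by
  intro L
  induction L with
  | nil => intro c r0 t0; simp [pvSteps, pvCat]
  | cons p t ih =>
      intro c r0 t0
      simp only [List.foldl_cons]
      rw [show pvBodyA int_a la n r (c, r0, t0) p
            = ((pvBodyA int_a la n r (c, r0, t0) p).1,
               (pvBodyA int_a la n r (c, r0, t0) p).2.1,
               (pvBodyA int_a la n r (c, r0, t0) p).2.2) from rfl]
      rw [ih, pvBodyA_trg, pvBodyA_fst]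
      simp only [pvSteps, List.map_cons, pvCat]
      rw [String.append_assoc]

-- ===== VERDICT (by name: the statement is the Claim_ definition above) =====
theorem generate_readable_chain_of_thought_spec : Claim_equal_generate_readable_chain_of_thought := by
  intro int_a int_b reverse_digits _ hpre
  obtain ⟨ha, hb, hl⟩ := hpre
  unfold Spec_generate_readable_chain_of_thought
  unfold generate_readable_chain_of_thought generate_readable_chain_of_thought_alt
  simp only [PySem.Int.toStr, String.toList_ofList, List.length_map]
  have hN1 : 1 ≤ (PySem.Int.toChars int_b).length := by
    have : PySem.Int.toChars int_b = Nat.toDigits 10 int_b.toNat := by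
      unfold PySem.Int.toChars; rw [if_neg (by omega)]
    rw [this]
    exact Nat.length_toDigits_pos
  rw [hl, pvFoldA, pvA_canon int_a int_b reverse_digits ha hb hl]
  rw [show (((PySem.Int.toChars int_b).length : Int) - 1).toNat
        = (PySem.Int.toChars int_b).length - 1 from by omega]
  rw [pvB_canon int_a int_b ((PySem.Int.toChars int_b).length) reverse_digits]
  · simp only
    rw [show (PySem.Int.toChars int_b).length - 1 + 1 = (PySem.Int.toChars int_b).length from by omega]
    simp
  · omega
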